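-- pv_equiv track=rewrite | github.com/AlvieSpurlock/MathCore | MathCore/MathTypes/Advanced/Topology.py | IsLocallyConnected
-- ===== SOURCE A (Python) =====
-- def _fs(s):
--     """Convert any iterable to frozenset."""
--     return frozenset(s)
--
-- def SubspaceTopology(A, open_sets):
--     A_fs = _fs(A)
--     return list(A), list({_fs(A_fs & _fs(U)) for U in open_sets})  # Induced subspace topology
--
-- def Neighbourhoods(x, open_sets):
--     return [_fs(U) for U in open_sets if x in _fs(U)]         # All open sets containing x
--
-- def IsConnected(points, open_sets):
--     X   = _fs(points)
--     oss = [_fs(U) for U in open_sets]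
--     for U in oss:
--         V = X - U
--         if U and V and _fs(V) in set(oss):                    # Non-empty partition into open sets
--             return False                                       # Found a disconnection
--     return True                                               # No splitting found → connected
--
-- def IsLocallyConnected(points, open_sets):
--     pts = list(points)
--     for x in pts:
--         nbhds = Neighbourhoods(x, open_sets)
--         # Every neighbourhood of x should contain a connected neighbourhood
--         for N in nbhds:
--             _, sub_oss = SubspaceTopology(N, open_sets)
--             if not IsConnected(N, sub_oss):
--                 return False                                   # Found non-connected neighbourhood
--     return True                                               # All neighbourhoods contain connected ones
-- ===== SOURCE B (Python) =====
-- def IsLocallyConnected(points, open_sets):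
--     # Pairwise-scan re-implementation: a neighbourhood N of x is disconnected
--     # iff some pair (U, V) of subspace open sets is nonempty, disjoint and covers N.
--     for x in points:
--         for N0 in open_sets:
--             N = frozenset(N0)
--             if x not in N:
--                 continue
--             opens = {N & frozenset(W) for W in open_sets}
--             for U in opens:
--                 for V in opens:
--                     if U and V and not (U & V) and (U | V) == N:
--                         return False
--     return True
-- ===== Notes on version B (the rewrite author's own statement) =====
-- stated objective: alternative
-- what changed: The connectedness kernel is replaced: instead of testing, for each subspace open U, whether the complement X-U is a member of a lookup set of opens, B scans all ordered pairs (U,V) of subspace opens and reports disconnected when U and V are nonempty, disjoint and U|V equals the neighbourhood; no complement is ever computed.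
import Mathlib
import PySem

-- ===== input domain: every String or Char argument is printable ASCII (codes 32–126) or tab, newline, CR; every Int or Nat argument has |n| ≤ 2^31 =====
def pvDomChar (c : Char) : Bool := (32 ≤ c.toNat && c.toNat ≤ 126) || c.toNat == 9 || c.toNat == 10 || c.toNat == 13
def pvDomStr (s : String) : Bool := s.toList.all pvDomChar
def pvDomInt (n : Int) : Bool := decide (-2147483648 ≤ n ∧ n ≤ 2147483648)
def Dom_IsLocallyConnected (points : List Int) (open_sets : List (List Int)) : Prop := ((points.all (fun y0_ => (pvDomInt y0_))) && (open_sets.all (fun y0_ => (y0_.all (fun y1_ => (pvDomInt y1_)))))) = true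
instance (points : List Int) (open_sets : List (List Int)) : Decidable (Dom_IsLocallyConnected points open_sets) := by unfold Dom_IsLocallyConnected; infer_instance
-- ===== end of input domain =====

-- B replaces A's connectedness kernel (complement + membership-set lookup) by a
-- pairwise scan over subspace open sets (objective: alternative, same cost class).

-- ===== PORT A =====
-- frozenset(s)
def pvFs (s : List Int) : PySem.Set Int := PySem.Set.ofList s

-- membership of a frozenset in a collection of frozensets (Python's hash-based
-- 'in' on frozensets compares by set equality, i.e. PySem.Set.equal)
def pvSetMem (s : PySem.Set Int) (l : List (PySem.Set Int)) : Bool :=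
  l.any (fun t => PySem.Set.equal t s)

-- a Python set of frozensets: deduplicate by frozenset equality, keeping first
-- occurrences (iteration order irrelevant: it is only used for 'any'/'in')
def pvDedup (l : List (PySem.Set Int)) : List (PySem.Set Int) :=
  l.foldl (fun acc u => if pvSetMem u acc then acc else acc ++ [u]) []

-- sub_oss of SubspaceTopology(A, open_sets) (the first component list(A) is discarded by A)
def pvSubspaceOss (A : List Int) (open_sets : List (List Int)) : List (PySem.Set Int) :=
  let Afs := pvFs A
  pvDedup (open_sets.map (fun U => PySem.Set.inter Afs (pvFs U)))

-- Neighbourhoods(x, open_sets)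
def pvNeighbourhoods (x : Int) (open_sets : List (List Int)) : List (PySem.Set Int) :=
  (open_sets.map (fun U => pvFs U)).filter (fun U => PySem.Set.contains U x)

-- IsConnected(points, open_sets); loop with early 'return False' = negated 'any'
def pvIsConnected (pts : List Int) (oss0 : List (PySem.Set Int)) : Bool :=
  let X := pvFs pts
  let oss := oss0.map (fun U => PySem.Set.ofList U)
  !(oss.any (fun U =>
      let V := PySem.Set.diff X U
      !U.isEmpty && !V.isEmpty && pvSetMem V oss))

def IsLocallyConnected (points : List Int) (open_sets : List (List Int)) : Bool :=
  !(points.any (fun x =>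
      (pvNeighbourhoods x open_sets).any (fun N =>
        !(pvIsConnected N (pvSubspaceOss N open_sets)))))

-- ===== PORT B =====
-- some pair (U, V) of subspace open sets is nonempty, disjoint and covers X
def pvDisconnPair (X : PySem.Set Int) (opens : List (PySem.Set Int)) : Bool :=
  opens.any (fun U => opens.any (fun V =>
    !U.isEmpty && !V.isEmpty && (PySem.Set.inter U V).isEmpty
      && PySem.Set.equal (PySem.Set.union U V) X))

def IsLocallyConnected_alt (points : List Int) (open_sets : List (List Int)) : Bool :=
  !(points.any (fun x =>
      open_sets.any (fun N0 =>
        let N := PySem.Set.ofList N0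
        N.contains x &&
          pvDisconnPair N
            (pvDedup (open_sets.map (fun W => PySem.Set.inter N (PySem.Set.ofList W)))))))

-- ===== PRECONDITION & SPEC =====
def Spec_IsLocallyConnected (points : List Int) (open_sets : List (List Int)) (out : Bool) : Prop := out = IsLocallyConnected_alt points open_sets
instance (points : List Int) (open_sets : List (List Int)) (out : Bool) : Decidable (Spec_IsLocallyConnected points open_sets out) := by unfold Spec_IsLocallyConnected; infer_instance

-- ===== CLAIM (what is proved, stated in full; the proofs are below) =====
def Claim_equal_IsLocallyConnected : Prop := ∀ (points : List Int) (open_sets : List (List Int)), Dom_IsLocallyConnected points open_sets → Spec_IsLocallyConnected points open_sets (IsLocallyConnected points open_sets)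

-- ===== LEMMAS AND PROOFS =====

-- every element of pvDedup l is an element of l
lemma mem_pvDedup_aux (l : List (PySem.Set Int)) (acc : List (PySem.Set Int)) (T : PySem.Set Int)
    (h : T ∈ l.foldl (fun acc u => if pvSetMem u acc then acc else acc ++ [u]) acc) :
    T ∈ acc ∨ T ∈ l := by
  induction l generalizing acc with
  | nil => exact Or.inl h
  | cons u tl ih =>
    simp only [List.foldl_cons] at h
    rcases ih _ h with h' | h'
    · by_cases hc : pvSetMem u acc = true
      · simp [hc] at h'; exact Or.inl h'
      · simp [hc] at h'
        rcases h' with h' | h'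
        · exact Or.inl h'
        · exact Or.inr (by simp [h'])
    · exact Or.inr (List.mem_cons_of_mem _ h')

lemma mem_pvDedup (l : List (PySem.Set Int)) (T : PySem.Set Int) (h : T ∈ pvDedup l) : T ∈ l := by
  rcases mem_pvDedup_aux l [] T h with h' | h'
  · simp at h'
  · exact h'

-- CORE: on a nodup carrier N with opens that are nodup subsets of N,
-- A's complement-lookup kernel agrees with B's pairwise scan (same list of opens).
lemma core (N : List Int) (hN : N.Nodup) (oss : List (PySem.Set Int))
    (hsub : ∀ U ∈ oss, U.Nodup ∧ ∀ a ∈ U, a ∈ N) :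
    (!(pvIsConnected N oss)) = pvDisconnPair N oss := by
  have hofN : PySem.Set.ofList N = N := PySem.Set.ofList_eq_self_of_nodup N hN
  have hmapid : oss.map (fun U => PySem.Set.ofList U) = oss := by
    apply List.map_congr_left ?_ |>.trans (List.map_id _)
    intro U hU
    exact PySem.Set.ofList_eq_self_of_nodup U (hsub U hU).1
  simp only [pvIsConnected, pvFs, hofN, hmapid, Bool.not_not]
  rw [Bool.eq_iff_iff]
  simp only [pvDisconnPair, pvSetMem, List.any_eq_true, Bool.and_eq_true,
    Bool.not_eq_eq_eq_not, Bool.not_true, List.isEmpty_eq_false_iff, ne_eq,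
    List.isEmpty_iff]
  constructor
  · rintro ⟨U, hUs, ⟨hUne, hVne⟩, T, hTs, hTe⟩
    have hTeq := (PySem.Set.equal_iff T _).mp hTe
    refine ⟨U, hUs, T, hTs, ⟨⟨hUne, ?_⟩, ?_⟩, ?_⟩
    · intro hTnil
      apply hVne
      apply List.eq_nil_iff_forall_not_mem.mpr
      intro a ha
      exact (List.eq_nil_iff_forall_not_mem.mp hTnil a) ((hTeq a).mpr ha)
    · apply List.eq_nil_iff_forall_not_mem.mpr
      intro a ha
      have := (PySem.Set.mem_inter U T a).mp ha
      have haT := (hTeq a).mp this.2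
      exact ((PySem.Set.mem_diff N U a).mp haT).2 this.1
    · apply (PySem.Set.equal_iff _ _).mpr
      intro a
      rw [PySem.Set.mem_union]
      constructor
      · rintro (h | h)
        · exact (hsub U hUs).2 a h
        · exact ((PySem.Set.mem_diff N U a).mp ((hTeq a).mp h)).1
      · intro haN
        by_cases haU : a ∈ U
        · exact Or.inl haU
        · exact Or.inr ((hTeq a).mpr ((PySem.Set.mem_diff N U a).mpr ⟨haN, haU⟩))
  · rintro ⟨U, hUs, V, hVs, ⟨⟨hUne, hVne⟩, hdisj⟩, hcov⟩
    have hcov' := (PySem.Set.equal_iff _ N).mp hcov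
    have hdisj' : ∀ a, ¬(a ∈ U ∧ a ∈ V) := by
      intro a ha
      exact (List.eq_nil_iff_forall_not_mem.mp hdisj a) ((PySem.Set.mem_inter U V a).mpr ha)
    -- membership in V equals membership in N \ U
    have hVdiff : ∀ a, a ∈ V ↔ a ∈ N ∧ a ∉ U := by
      intro a
      constructor
      · intro haV
        exact ⟨(hcov' a).mp ((PySem.Set.mem_union U V a).mpr (Or.inr haV)),
          fun haU => hdisj' a ⟨haU, haV⟩⟩
      · rintro ⟨haN, haU⟩
        rcases (PySem.Set.mem_union U V a).mp ((hcov' a).mpr haN) with h | h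
        · exact absurd h haU
        · exact h
    refine ⟨U, hUs, ⟨hUne, ?_⟩, V, hVs, ?_⟩
    · obtain ⟨a, ha⟩ := List.exists_mem_of_ne_nil V hVne
      refine List.ne_nil_of_mem ((PySem.Set.mem_diff N U a).mpr ?_)
      exact (hVdiff a).mp ha
    · apply (PySem.Set.equal_iff _ _).mpr
      intro a
      rw [hVdiff a, PySem.Set.mem_diff]

-- per neighbourhood N0: A's inner test equals B's inner test
lemma per_nbhd (open_sets : List (List Int)) (N0 : List Int) :
    (!(pvIsConnected (PySem.Set.ofList N0) (pvSubspaceOss (PySem.Set.ofList N0) open_sets)))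
      = pvDisconnPair (PySem.Set.ofList N0)
          (pvDedup (open_sets.map (fun W =>
            PySem.Set.inter (PySem.Set.ofList N0) (PySem.Set.ofList W)))) := by
  have hN : (PySem.Set.ofList N0).Nodup := PySem.Set.nodup_ofList N0
  have hsubs : pvSubspaceOss (PySem.Set.ofList N0) open_sets
      = pvDedup (open_sets.map (fun W => PySem.Set.inter (PySem.Set.ofList N0) (PySem.Set.ofList W))) := by
    simp only [pvSubspaceOss, pvFs, PySem.Set.ofList_ofList]
  rw [hsubs]
  apply core _ hN
  intro U hU
  have hU' := mem_pvDedup _ _ hU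
  simp only [List.mem_map] at hU'
  obtain ⟨W, _, rfl⟩ := hU'
  refine ⟨PySem.Set.nodup_inter _ _ hN, fun a ha => ?_⟩
  exact ((PySem.Set.mem_inter _ _ a).mp ha).1

-- ===== VERDICT (by name: the statement is the Claim_ definition above) =====
theorem IsLocallyConnected_spec : Claim_equal_IsLocallyConnected := by
  intro points open_sets _
  unfold Spec_IsLocallyConnected IsLocallyConnected IsLocallyConnected_alt
  refine congrArg (fun b => !b) (congrArg points.any (funext fun x => ?_))
  rw [pvNeighbourhoods, List.any_filter, List.any_map]
  refine congrArg open_sets.any (funext fun N0 => ?_)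
  show (PySem.Set.contains (pvFs N0) x && !(pvIsConnected (pvFs N0) (pvSubspaceOss (pvFs N0) open_sets)))
      = (PySem.Set.contains (PySem.Set.ofList N0) x
          && pvDisconnPair (PySem.Set.ofList N0)
               (pvDedup (open_sets.map (fun W =>
                 PySem.Set.inter (PySem.Set.ofList N0) (PySem.Set.ofList W)))))
  simp only [pvFs]
  rw [per_nbhd]
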